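-- pv_equiv track=rewrite | github.com/advena/pricinples_of_computing | week3/yahtzee/game_logic_yahtzee.py | gen_all_holds
-- ===== SOURCE A (Python) =====
-- def gen_all_sequences(outcomes, length):
--     """
--     Iterative function that enumerates the set of all sequences of
--     outcomes of given length.
--     """
--
--     answer_set = [()]
--     for dummy_idx in range(length):
--         temp_set = set()
--         for partial_sequence in answer_set:
--             for item in outcomes:
--                 new_sequence = list(partial_sequence)
--                 new_sequence.append(item)
--                 temp_set.add(tuple(new_sequence))
--         answer_set = temp_set
--     return sorted(answer_set)
--
-- def gen_all_holds(hand):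
--     """
--     Generate all possible choices of dice from hand to hold.
--
--     hand: full yahtzee hand
--
--     Returns a set of tuples, where each tuple is dice to hold
--     """
--
--     mask = sorted(gen_all_sequences((1,0), len(hand)))
--     answer_set = []
--     for current_mask in mask:
--         temp = []
--         for indx in range(len(current_mask)):
--             if current_mask[indx] == 1:
--                 temp.append(hand[indx]);
--         answer_set.append(tuple(temp))
--     return set(answer_set)
-- ===== SOURCE B (Python) =====
-- def gen_all_holds(hand):
--     """
--     Generate all possible choices of dice from hand to hold.
--
--     hand: full yahtzee hand
--
--     Returns a set of tuples, where each tuple is dice to hold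
--     """
--     subs = [()]
--     for die in reversed(hand):
--         subs = subs + [(die,) + sub for sub in subs]
--     return set(subs)
-- ===== Notes on version B (the rewrite author's own statement) =====
-- stated objective: alternative
-- what changed: B builds the held-dice subsequences directly by doubling a list while scanning the hand right-to-left (each step prepends the current die to every existing subset), instead of A's generation of all 2^n binary masks via repeated cartesian products with per-round set deduplication, sorting them twice, and then applying each mask to the hand with an index loop.
import Mathlib
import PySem

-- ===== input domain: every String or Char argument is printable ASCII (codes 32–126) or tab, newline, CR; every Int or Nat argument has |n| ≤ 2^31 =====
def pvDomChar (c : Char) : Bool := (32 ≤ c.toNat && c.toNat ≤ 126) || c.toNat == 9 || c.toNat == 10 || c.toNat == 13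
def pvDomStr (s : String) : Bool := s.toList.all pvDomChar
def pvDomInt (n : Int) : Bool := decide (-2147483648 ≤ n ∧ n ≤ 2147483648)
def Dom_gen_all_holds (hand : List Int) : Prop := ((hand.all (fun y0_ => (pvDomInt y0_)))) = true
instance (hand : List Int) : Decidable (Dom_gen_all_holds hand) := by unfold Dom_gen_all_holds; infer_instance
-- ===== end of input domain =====

-- B replaces A's mask generation (cartesian products with per-round set dedup, double sort,
-- then index-loop mask application) by one right-to-left doubling pass that builds the
-- subsequences directly; objective: alternative (same output, no masks and no sorting).

-- ===== PORT A =====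
-- port of gen_all_sequences(outcomes, length); the set 'temp_set' is built with PySem.Set.add
def gen_all_sequences (outcomes : List Int) (length : Nat) : List (List Int) :=
  let answer_set := (List.range length).foldl
    (fun answer_set _dummy_idx =>
      answer_set.foldl
        (fun temp_set partial_sequence =>
          outcomes.foldl
            (fun temp_set item => PySem.Set.add temp_set (partial_sequence ++ [item]))
            temp_set)
        PySem.Set.empty)
    [[]]
  PySem.List.sorted answer_set (fun x => x)

def gen_all_holds (hand : List Int) : List (List Int) :=
  let mask := PySem.List.sorted (gen_all_sequences [1, 0] hand.length) (fun x => x)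
  let answer_set := mask.foldl
    (fun answer_set current_mask =>
      let temp := (PySem.List.pyRange 0 (current_mask.length : Int)).foldl
        (fun temp indx =>
          -- current_mask[indx] / hand[indx]: indx < len(current_mask) = len(hand), so the
          -- total pyGetD is exact here (Python never raises)
          if PySem.List.pyGetD current_mask indx 0 == 1
          then temp ++ [PySem.List.pyGetD hand indx 0]
          else temp)
        []
      answer_set ++ [temp])
    []
  PySem.Set.ofList answer_set

-- ===== PORT B =====
def gen_all_holds_alt (hand : List Int) : List (List Int) :=
  let subs := hand.reverse.foldl
    (fun subs die => subs ++ subs.map (fun sub => die :: sub))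
    [[]]
  PySem.Set.ofList subs

-- ===== PRECONDITION & SPEC =====
def Spec_gen_all_holds (hand : List Int) (out : List (List Int)) : Prop := out = gen_all_holds_alt hand
instance (hand : List Int) (out : List (List Int)) : Decidable (Spec_gen_all_holds hand out) := by unfold Spec_gen_all_holds; infer_instance

-- ===== CLAIM (what is proved, stated in full; the proofs are below) =====
def Claim_equal_gen_all_holds : Prop := ∀ (hand : List Int), Dom_gen_all_holds hand → Spec_gen_all_holds hand (gen_all_holds hand)

-- ===== LEMMAS AND PROOFS =====

-- the list state of A's sequence loop after n rounds (before any sorting / dedup is no-op)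
def pvS : Nat → List (List Int)
  | 0 => [[]]
  | n + 1 => (pvS n).flatMap (fun p => [p ++ [1], p ++ [0]])

-- all 0/1 masks of length n in lexicographic order
def pvM : Nat → List (List Int)
  | 0 => [[]]
  | n + 1 => (pvM n).map (fun p => 0 :: p) ++ (pvM n).map (fun p => 1 :: p)

-- apply a mask to the hand
def pvApply : List Int → List Int → List Int
  | b :: bs, x :: xs => if b == 1 then x :: pvApply bs xs else pvApply bs xs
  | _, _ => []

-- the recursion B's doubling loop implements
def pvSubs : List Int → List (List Int)
  | [] => [[]]
  | x :: r => pvSubs r ++ (pvSubs r).map (fun s => x :: s)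



lemma pv_snoc_inj {p q : List Int} {i j : Int} (h : p ++ [i] = q ++ [j]) : p = q ∧ i = j := by
  have := List.append_inj' h rfl
  simpa using this

lemma pv_mem_S (n : Nat) (x : List Int) :
    x ∈ pvS n ↔ x.length = n ∧ ∀ b ∈ x, b = 1 ∨ b = 0 := by
  induction n generalizing x with
  | zero =>
      simp [pvS, List.length_eq_zero_iff]
      rintro rfl; simp
  | succ n ih =>
      simp only [pvS, List.mem_flatMap, List.mem_cons, List.not_mem_nil, or_false]
      constructor
      · rintro ⟨p, hp, hx⟩
        obtain ⟨hl, hb⟩ := (ih p).1 hp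
        rcases hx with rfl | rfl <;>
          refine ⟨by simp [hl], ?_⟩ <;>
            (intro b hbmem
             rcases List.mem_append.1 hbmem with h' | h'
             · exact hb b h'
             · simp at h'; omega)
      · rintro ⟨hl, hb⟩
        have hne : x ≠ [] := by intro h; subst h; simp at hl
        have hxdec : x.dropLast ++ [x.getLast hne] = x := List.dropLast_concat_getLast hne
        have hpl : x.dropLast.length = n := by
          rw [List.length_dropLast, hl]
          simp
        have hpmem : x.dropLast ∈ pvS n := by
          refine (ih _).2 ⟨hpl, ?_⟩
          intro b hbmem
          exact hb b (List.dropLast_subset x hbmem)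
        refine ⟨x.dropLast, hpmem, ?_⟩
        rcases hb _ (List.getLast_mem hne) with h1 | h0
        · left; rw [h1] at hxdec; exact hxdec.symm
        · right; rw [h0] at hxdec; exact hxdec.symm

lemma pv_nodup_S (n : Nat) : (pvS n).Nodup := by
  induction n with
  | zero => simp [pvS]
  | succ n ih =>
      rw [pvS, List.nodup_flatMap]
      constructor
      · intro p _
        refine List.nodup_cons.2 ⟨?_, List.nodup_singleton _⟩
        simp only [List.mem_singleton]
        intro h
        have := (pv_snoc_inj h).2; omega
      · refine ih.imp ?_
        intro p q hpq a hap haq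
        simp only [List.mem_cons, List.not_mem_nil, or_false] at hap haq
        rcases hap with rfl | rfl <;> rcases haq with h | h <;>
          exact hpq (pv_snoc_inj h).1

lemma pv_round_eq : ∀ (xs : List (List Int)) (acc : List (List Int)),
    xs.Nodup → (∀ p ∈ xs, ∀ i : Int, p ++ [i] ∉ acc) →
    xs.foldl (fun t p => PySem.Set.add (PySem.Set.add t (p ++ [(1:Int)])) (p ++ [0])) acc
      = acc ++ xs.flatMap (fun p => [p ++ [1], p ++ [0]]) := by
  intro xs
  induction xs with
  | nil => intro acc _ _; simp
  | cons p xs ih =>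
      intro acc hnd hfresh
      have h1 : p ++ [(1:Int)] ∉ acc := hfresh p (by simp) 1
      have h0 : p ++ [(0:Int)] ∉ acc := hfresh p (by simp) 0
      have hne : p ++ [(0:Int)] ≠ p ++ [1] := by
        intro h; have := (pv_snoc_inj h).2; omega
      have hstep : PySem.Set.add (PySem.Set.add acc (p ++ [(1:Int)])) (p ++ [0])
          = acc ++ [p ++ [1], p ++ [0]] := by
        simp [PySem.Set.add, PySem.Set.contains, h1, h0, hne]
      have hfresh' : ∀ q ∈ xs, ∀ i : Int, q ++ [i] ∉ acc ++ [p ++ [1], p ++ [0]] := by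
        intro q hq i
        simp only [List.mem_append, List.mem_cons, List.not_mem_nil, or_false, not_or]
        have hqp : q ≠ p := fun h => (List.nodup_cons.1 hnd).1 (h ▸ hq)
        exact ⟨hfresh q (List.mem_cons_of_mem _ hq) i,
          fun h => hqp (pv_snoc_inj h).1, fun h => hqp (pv_snoc_inj h).1⟩
      rw [List.foldl_cons, hstep, ih _ (List.Nodup.of_cons hnd) hfresh']
      simp

lemma pv_loop_eq_S (n : Nat) :
    (List.range n).foldl
      (fun answer_set _dummy_idx =>
        answer_set.foldl
          (fun temp_set partial_sequence =>
            PySem.Set.add (PySem.Set.add temp_set (partial_sequence ++ [(1:Int)]))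
              (partial_sequence ++ [0]))
          PySem.Set.empty)
      [[]] = pvS n := by
  induction n with
  | zero => simp [pvS]
  | succ n ih =>
      rw [List.range_succ, List.foldl_append, ih, List.foldl_cons, List.foldl_nil]
      rw [pv_round_eq (pvS n) PySem.Set.empty (pv_nodup_S n) (by
        intro p _ i h
        simp [PySem.Set.empty] at h)]
      simp [PySem.Set.empty, pvS]

lemma pv_mem_M (n : Nat) (x : List Int) :
    x ∈ pvM n ↔ x.length = n ∧ ∀ b ∈ x, b = 1 ∨ b = 0 := by
  induction n generalizing x with
  | zero =>
      simp [pvM, List.length_eq_zero_iff]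
      rintro rfl; simp
  | succ n ih =>
      simp only [pvM, List.mem_append, List.mem_map]
      constructor
      · rintro (⟨p, hp, rfl⟩ | ⟨p, hp, rfl⟩) <;>
          obtain ⟨hl, hb⟩ := (ih p).1 hp <;>
          refine ⟨by simp [hl], ?_⟩ <;>
            (intro b hbmem
             rcases List.mem_cons.1 hbmem with rfl | h'
             · omega
             · exact hb b h')
      · rintro ⟨hl, hb⟩
        cases x with
        | nil => simp at hl
        | cons b t =>
            have htmem : t ∈ pvM n := by
              refine (ih t).2 ⟨by simpa using hl, ?_⟩
              intro c hc; exact hb c (List.mem_cons_of_mem _ hc)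
            rcases hb b (by simp) with rfl | rfl
            · right; exact ⟨t, htmem, rfl⟩
            · left; exact ⟨t, htmem, rfl⟩

lemma pv_nodup_M (n : Nat) : (pvM n).Nodup := by
  induction n with
  | zero => simp [pvM]
  | succ n ih =>
      rw [pvM, List.nodup_append]
      have hdisj : ∀ a : List Int, a ∈ (pvM n).map (fun p => (0:Int) :: p) →
          a ∈ (pvM n).map (fun p => (1:Int) :: p) → False := by
        intro a ha hb
        obtain ⟨p, -, rfl⟩ := List.mem_map.1 ha
        obtain ⟨q, -, hq⟩ := List.mem_map.1 hb
        exact absurd hq (by simp)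
      refine ⟨ih.map ?_, ih.map ?_, fun a ha b hb h => hdisj a ha (h ▸ hb)⟩
      · intro a b h; simpa using h
      · intro a b h; simpa using h

lemma pv_pairwise_M (n : Nat) : (pvM n).Pairwise (· < ·) := by
  induction n with
  | zero => simp [pvM]
  | succ n ih =>
      rw [pvM, List.pairwise_append]
      refine ⟨?_, ?_, ?_⟩
      · rw [List.pairwise_map]
        exact ih.imp (fun h => List.Lex.cons h)
      · rw [List.pairwise_map]
        exact ih.imp (fun h => List.Lex.cons h)
      · intro a ha b hb
        simp only [List.mem_map] at ha hb
        obtain ⟨p, -, rfl⟩ := ha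
        obtain ⟨q, -, rfl⟩ := hb
        exact List.Lex.rel (by norm_num)

lemma pv_sorted_inst (d₁ d₂ : DecidableLT (List Int)) (xs : List (List Int)) :
    @PySem.List.sorted (List Int) (List Int) List.instLT d₁ xs (fun x => x) false
      = @PySem.List.sorted (List Int) (List Int) List.instLT d₂ xs (fun x => x) false := by
  have h : d₁ = d₂ := by
    funext a b
    exact Subsingleton.elim _ _
  rw [h]

lemma pv_sorted_S (n : Nat) :
    PySem.List.sorted (pvS n) (fun x => x) = pvM n := by
  rw [pv_sorted_inst _ (@LinearOrder.toDecidableLT _ (List.instLinearOrder (α := Int))) (pvS n)]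
  exact PySem.List.sorted_eq_of_perm_of_pairwise_lt _ _ _
    ((List.perm_ext_iff_of_nodup (pv_nodup_M n) (pv_nodup_S n)).2
      (fun a => by rw [pv_mem_M, pv_mem_S]))
    (pv_pairwise_M n)

lemma pv_sorted_M (n : Nat) :
    PySem.List.sorted (pvM n) (fun x => x) = pvM n := by
  rw [pv_sorted_inst _ (@LinearOrder.toDecidableLT _ (List.instLinearOrder (α := Int))) (pvM n)]
  exact PySem.List.sorted_eq_self_of_pairwise _ _ ((pv_pairwise_M n).imp le_of_lt)

lemma pv_inner (fuel : Nat) (m h : List Int) (k : Nat) (acc : List Int)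
    (hlen : m.length = h.length) (hfuel : m.length - k ≤ fuel) :
    (PySem.List.pyRange (k : Int) (m.length : Int)).foldl
      (fun t i => if PySem.List.pyGetD m i 0 == 1 then t ++ [PySem.List.pyGetD h i 0] else t)
      acc
      = acc ++ pvApply (m.drop k) (h.drop k) := by
  induction fuel generalizing k acc with
  | zero =>
      have hk : m.length ≤ k := by omega
      have hnil : PySem.List.pyRange (k : Int) (m.length : Int) = [] := by
        rw [PySem.List.pyRange_one]
        have h0 : ((m.length : Int) - (k : Int)).toNat = 0 := by omega
        simp [h0]
      rw [hnil, List.foldl_nil, List.drop_eq_nil_of_le hk,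
        List.drop_eq_nil_of_le (by omega)]
      simp [pvApply]
  | succ fuel ih =>
      by_cases hk : k < m.length
      · rw [PySem.List.pyRange_one_cons (by exact_mod_cast hk), List.foldl_cons]
        have hk' : k < h.length := by omega
        have hm : PySem.List.pyGetD m (k : Int) 0 = m[k] := by
          rw [PySem.List.pyGetD_natCast, List.getD_eq_getElem _ _ hk]
        have hh : PySem.List.pyGetD h (k : Int) 0 = h[k] := by
          rw [PySem.List.pyGetD_natCast, List.getD_eq_getElem _ _ hk']
        have hcast : ((k : Int) + 1) = ((k + 1 : Nat) : Int) := by push_cast; ring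
        have hdrop : pvApply (m.drop k) (h.drop k)
            = if m[k] == 1 then h[k] :: pvApply (m.drop (k + 1)) (h.drop (k + 1))
              else pvApply (m.drop (k + 1)) (h.drop (k + 1)) := by
          rw [List.drop_eq_getElem_cons hk, List.drop_eq_getElem_cons hk']
          rfl
        rw [hm, hh, hcast, hdrop]
        by_cases hc : (m[k] == 1) = true
        · rw [if_pos hc, if_pos hc, ih (k + 1) (acc ++ [h[k]]) (by omega)]
          simp
        · rw [if_neg hc, if_neg hc, ih (k + 1) acc (by omega)]
      · have hnil : PySem.List.pyRange (k : Int) (m.length : Int) = [] := by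
          rw [PySem.List.pyRange_one]
          have h0 : ((m.length : Int) - (k : Int)).toNat = 0 := by omega
          simp [h0]
        rw [hnil, List.foldl_nil, List.drop_eq_nil_of_le (by omega),
          List.drop_eq_nil_of_le (by omega)]
        simp [pvApply]

lemma pv_apply_M (hand : List Int) :
    (pvM hand.length).map (fun m => pvApply m hand) = pvSubs hand := by
  induction hand with
  | nil => simp [pvM, pvSubs, pvApply]
  | cons x r ih =>
      show ((pvM r.length).map (fun p => (0:Int) :: p)
          ++ (pvM r.length).map (fun p => (1:Int) :: p)).map (fun m => pvApply m (x :: r))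
          = pvSubs r ++ (pvSubs r).map (fun s => x :: s)
      have hcongr0 : ∀ p ∈ pvM r.length,
          ((fun m => pvApply m (x :: r)) ∘ fun p => (0:Int) :: p) p
            = (fun m => pvApply m r) p := by
        intro p _; simp [Function.comp, pvApply]
      have hcongr1 : ∀ p ∈ pvM r.length,
          ((fun m => pvApply m (x :: r)) ∘ fun p => (1:Int) :: p) p
            = ((fun s => x :: s) ∘ fun m => pvApply m r) p := by
        intro p _; simp [Function.comp, pvApply]
      rw [List.map_append, List.map_map, List.map_map, List.map_congr_left hcongr0,
        List.map_congr_left hcongr1, ← List.map_map, ih]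

lemma pv_fold_subs (hand : List Int) :
    hand.reverse.foldl (fun subs die => subs ++ subs.map (fun sub => die :: sub)) [[]]
      = pvSubs hand := by
  induction hand with
  | nil => rfl
  | cons x r ih =>
      simp [pvSubs, List.foldl_append, ih]

-- ===== VERDICT (by name: the statement is the Claim_ definition above) =====
theorem gen_all_holds_spec : Claim_equal_gen_all_holds := by
  intro hand _
  unfold Spec_gen_all_holds gen_all_holds gen_all_holds_alt gen_all_sequences
  rw [pv_fold_subs]
  simp only [List.foldl_cons, List.foldl_nil]
  rw [pv_loop_eq_S hand.length]
  rw [pv_sorted_S, pv_sorted_M]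
  rw [PySem.List.foldl_append_singleton_eq_map
    (fun current_mask => (PySem.List.pyRange 0 (current_mask.length : Int)).foldl
      (fun temp indx =>
        if PySem.List.pyGetD current_mask indx 0 == 1
        then temp ++ [PySem.List.pyGetD hand indx 0]
        else temp)
      []) (pvM hand.length) []]
  have hmap : (pvM hand.length).map
      (fun current_mask => (PySem.List.pyRange 0 (current_mask.length : Int)).foldl
        (fun temp indx =>
          if PySem.List.pyGetD current_mask indx 0 == 1
          then temp ++ [PySem.List.pyGetD hand indx 0]
          else temp)
        []) = (pvM hand.length).map (fun m => pvApply m hand) := by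
    apply List.map_congr_left
    intro m hm
    have hlen : m.length = hand.length := ((pv_mem_M _ _).1 hm).1
    have hin := pv_inner m.length m hand 0 [] hlen (by omega)
    simpa using hin
  rw [List.nil_append, hmap, pv_apply_M]
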